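-- pv_equiv track=rewrite | github.com/RyanMontville/rubiksTextGeneration | calculate.py | makeLine
-- ===== SOURCE A (Python) =====
-- def widthOfCharacter(character):
--     """Returns the number of pieces needed to draw the character.
--     If any other characters are entered other than those with defined functions,
--     replace that character with a space.
--     :param character: The character to calculate the width of
--     :returns the number of pieces needed to draw the character"""
--     match character:
--         case "a" | "b" | "c" | "d" | "e" | "f" | "g" | "h" | "i" | "k" | "l" | "o" | "p" | "r" | "s" | "t" | "u" | \
--              "v" | "y" | "1" | "2" | "3" | "4" | "5" | "6" | "7" | "8" | "9" | "0" | "?":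
--             return 3
--         case "j" | "n":
--             return 4
--         case "m" | "w" | "x" | "#":
--             return 5
--         case "!" | "'":
--             return 1
--         case _:
--             return 2
--
-- def calculateWidthOfWord(word):
--     """Returns the number of pixels wide a word is
--     :param word: The word to calculate the width of
--     :returns the width of the word in pieces"""
--     characters = list(word)
--     width_of_word = 0
--     for character in characters:
--         width_of_word += widthOfCharacter(character)
--     width_of_word += len(characters) - 1
--     return width_of_word
--
-- def makeLine(text, width):
--     """Given the width of the mosaic, fit as many words on a line. Will return the line as a string, the height of
--     the line, and the rest of the text as a second string."""
--     single_line = []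
--     pieces_left_in_line = width
--     words = text.split()
--     while pieces_left_in_line > 0 and len(words) > 0:
--         current_word_length = calculateWidthOfWord(words[0])
--         if current_word_length <= pieces_left_in_line:
--             single_line.append(words[0])
--             words.remove(words[0])
--             pieces_left_in_line -= current_word_length
--         else:
--             break
--
--     line_final = ' '.join(single_line)
--     remaining_text = ' '.join(words)
--     # Find height of line. If line contains ' or ? the height is 6 instead of 5
--     if "?" in line_final:
--         return line_final, 6, remaining_text
--     elif "'" in line_final:
--         return line_final, 6, remaining_text
--     else:
--         return line_final, 5, remaining_text
-- ===== SOURCE B (Python) =====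
-- def _charWidth(c):
--     if c in "!'":
--         return 1
--     if c in "jn":
--         return 4
--     if c in "mwx#":
--         return 5
--     if c in "abcdefghikloprstuvy1234567890?":
--         return 3
--     return 2
--
-- def _wordWidth(word):
--     return sum(_charWidth(c) for c in word) + len(word) - 1
--
-- def makeLine(text, width):
--     """Prefix-sum table + binary-search cutoff instead of the pop-and-subtract greedy loop."""
--     words = text.split()
--     cum = []
--     total = 0
--     for w in words:
--         total += _wordWidth(w)
--         cum.append(total)
--     lo, hi = 0, len(cum)
--     while lo < hi:
--         mid = (lo + hi) // 2
--         if cum[mid] <= width: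
--             lo = mid + 1
--         else:
--             hi = mid
--     line = ' '.join(words[:lo])
--     rest = ' '.join(words[lo:])
--     height = 6 if ('?' in line or "'" in line) else 5
--     return line, height, rest
-- ===== Notes on version B (the rewrite author's own statement) =====
-- stated objective: alternative
-- what changed: B replaces A's destructive pop-and-subtract greedy loop (recomputing each word's width and mutating the word list) by a precomputed prefix-sum table of word widths with a hand-written binary-search cutoff, then slices the word list once.
import Mathlib
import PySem

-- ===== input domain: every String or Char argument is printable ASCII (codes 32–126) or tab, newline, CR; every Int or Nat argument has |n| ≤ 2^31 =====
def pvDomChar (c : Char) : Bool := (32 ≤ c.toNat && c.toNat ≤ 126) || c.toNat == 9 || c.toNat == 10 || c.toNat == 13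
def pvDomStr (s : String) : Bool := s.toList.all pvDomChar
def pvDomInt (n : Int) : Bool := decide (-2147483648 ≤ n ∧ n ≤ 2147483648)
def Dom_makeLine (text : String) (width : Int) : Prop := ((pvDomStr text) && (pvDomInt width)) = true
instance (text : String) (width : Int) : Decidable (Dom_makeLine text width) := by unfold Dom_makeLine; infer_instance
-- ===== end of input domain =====

-- B replaces A's pop-and-subtract greedy loop by a prefix-sum table of word widths with a
-- hand-written binary-search cutoff (objective: alternative; return value only — A pops from its
-- local words list, no caller-visible mutation).

-- ===== PORT A =====
-- widthOfCharacter: the match statement, alternatives as literal char lists, branches in A's order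
def widthOfCharacter (character : Char) : Int :=
  if character ∈ (['a','b','c','d','e','f','g','h','i','k','l','o','p','r','s','t','u','v','y',
      '1','2','3','4','5','6','7','8','9','0','?'] : List Char) then 3
  else if character ∈ (['j','n'] : List Char) then 4
  else if character ∈ (['m','w','x','#'] : List Char) then 5
  else if character ∈ (['!','\''] : List Char) then 1
  else 2

def calculateWidthOfWord (word : String) : Int :=
  let characters := word.toList
  let width_of_word := characters.foldl (fun acc c => acc + widthOfCharacter c) 0
  width_of_word + ((characters.length : Int) - 1)

-- the while loop of makeLine; `words.remove(words[0])` removes the first occurrence of the head,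
-- i.e. the head itself, so it is the tail
def makeLineLoop (words : List String) (pieces_left : Int) (single_line : List String) :
    List String × List String :=
  if pieces_left ≤ 0 then (single_line, words)
  else
    match words with
    | [] => (single_line, [])
    | w :: ws =>
      let cw := calculateWidthOfWord w
      if cw ≤ pieces_left then makeLineLoop ws (pieces_left - cw) (single_line ++ [w])
      else (single_line, w :: ws)

def makeLine (text : String) (width : Int) : String × Int × String :=
  let words := PySem.Str.split₀ text
  let r := makeLineLoop words width []
  let line_final := PySem.Str.join " " r.1
  let remaining_text := PySem.Str.join " " r.2
  if PySem.Str.isIn "?" line_final then (line_final, 6, remaining_text)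
  else if PySem.Str.isIn "'" line_final then (line_final, 6, remaining_text)
  else (line_final, 5, remaining_text)

-- ===== PORT B =====
def bCharWidth (c : Char) : Int :=
  -- each `c in "<chars>"` membership test written as membership in the string's char list
  if c ∈ (['!','\''] : List Char) then 1
  else if c ∈ (['j','n'] : List Char) then 4
  else if c ∈ (['m','w','x','#'] : List Char) then 5
  else if c ∈ (['a','b','c','d','e','f','g','h','i','k','l','o','p','r','s','t','u','v','y',
      '1','2','3','4','5','6','7','8','9','0','?'] : List Char) then 3
  else 2

def bWordWidth (word : String) : Int :=
  (word.toList.map bCharWidth).sum + ((word.toList.length : Int) - 1)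

-- the `total`/`cum.append` loop of Source B: state = (total, cum)
def bCumul (ws : List Int) : List Int :=
  (ws.foldl (fun (p : Int × List Int) x => (p.1 + x, p.2 ++ [p.1 + x])) (0, [])).2

-- the while lo < hi binary search of Source B; cum[mid] as pyGetD (exact: mid < cum.length throughout)
def bSearch (cum : List Int) (width : Int) (lo hi : Nat) : Nat :=
  if lo < hi then
    let mid := (lo + hi) / 2
    if PySem.List.pyGetD cum (mid : Int) 0 ≤ width then bSearch cum width (mid + 1) hi
    else bSearch cum width lo mid
  else lo
termination_by hi - lo
decreasing_by all_goals omega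

def makeLine_alt (text : String) (width : Int) : String × Int × String :=
  let words := PySem.Str.split₀ text
  let cum := bCumul (words.map bWordWidth)
  let k := bSearch cum width 0 cum.length
  let line := PySem.Str.join " " (words.take k)
  let rest := PySem.Str.join " " (words.drop k)
  let height : Int := if PySem.Str.isIn "?" line || PySem.Str.isIn "'" line then 6 else 5
  (line, height, rest)

-- ===== PRECONDITION & SPEC =====
def Spec_makeLine (text : String) (width : Int) (out : String × Int × String) : Prop := out = makeLine_alt text width
instance (text : String) (width : Int) (out : String × Int × String) : Decidable (Spec_makeLine text width out) := by unfold Spec_makeLine; infer_instance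

-- ===== CLAIM (what is proved, stated in full; the proofs are below) =====
def Claim_equal_makeLine : Prop := ∀ (text : String) (width : Int), Dom_makeLine text width → Spec_makeLine text width (makeLine text width)

-- ===== LEMMAS AND PROOFS =====

-- the two character-width helpers agree
lemma charWidth_eq (c : Char) : widthOfCharacter c = bCharWidth c := by
  by_cases h : c ∈ (['a','b','c','d','e','f','g','h','i','k','l','o','p','r','s','t','u','v','y',
      '1','2','3','4','5','6','7','8','9','0','?','j','n','m','w','x','#','!','\''] : List Char)
  · fin_cases h <;> decide
  · simp only [List.mem_cons, not_or] at h
    unfold widthOfCharacter bCharWidth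
    rw [if_neg, if_neg, if_neg, if_neg, if_neg, if_neg, if_neg, if_neg] <;>
      simp only [List.mem_cons, not_or] <;> tauto

-- the two word-width helpers agree
lemma wordWidth_eq (w : String) : calculateWidthOfWord w = bWordWidth w := by
  unfold calculateWidthOfWord bWordWidth
  rw [List.sum_eq_foldl, List.foldl_map]
  simp [charWidth_eq]

lemma widthOfCharacter_pos (c : Char) : 1 ≤ widthOfCharacter c := by
  unfold widthOfCharacter; split_ifs <;> norm_num

lemma foldl_width_ge (l : List Char) (a : Int) :
    a + l.length ≤ l.foldl (fun acc c => acc + widthOfCharacter c) a := by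
  induction l generalizing a with
  | nil => simp
  | cons c t ih =>
    have h1 := widthOfCharacter_pos c
    have := ih (a + widthOfCharacter c)
    simp only [List.foldl_cons, List.length_cons]
    push_cast
    omega

lemma wordWidth_pos (w : String) (hw : w.toList ≠ []) : 1 ≤ calculateWidthOfWord w := by
  unfold calculateWidthOfWord
  have := foldl_width_ge w.toList 0
  have hlen : 1 ≤ w.toList.length := by
    cases h : w.toList with
    | nil => exact absurd h hw
    | cons a t => simp
  push_cast at *
  omega

-- words produced by str.split() are nonempty
lemma split0_go_ne_nil (s : List Char) :
    ∀ cur acc, (∀ a ∈ acc, a ≠ ([] : List Char)) →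
      ∀ w ∈ PySem.Chars.split₀.go s cur acc, w ≠ [] := by
  induction s with
  | nil =>
    intro cur acc hacc w hw
    simp only [PySem.Chars.split₀.go] at hw
    split at hw
    · exact hacc w (by simpa using hw)
    · next hne =>
      rcases (show w ∈ acc ∨ w = cur.reverse by simpa using hw) with h | rfl
      · exact hacc w h
      · simp only [List.isEmpty_iff] at hne
        intro hnil
        simp only [List.reverse_eq_nil_iff] at hnil
        exact hne hnil
  | cons c rest ih =>
    intro cur acc hacc w hw
    simp only [PySem.Chars.split₀.go] at hw
    split at hw
    · split at hw
      · exact ih [] acc hacc w hw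
      · next hne =>
        refine ih [] (cur.reverse :: acc) ?_ w hw
        intro a ha
        simp only [List.mem_cons] at ha
        rcases ha with rfl | ha
        · simp only [List.isEmpty_iff] at hne
          simpa using hne
        · exact hacc _ ha
    · exact ih (c :: cur) acc hacc w hw

lemma split0_ne_nil (text : String) : ∀ w ∈ PySem.Str.split₀ text, w.toList ≠ [] := by
  intro w hw
  have : w.toList ∈ (PySem.Str.split₀ text).map String.toList := List.mem_map_of_mem hw
  rw [PySem.Str.split₀_map_toList] at this
  exact split0_go_ne_nil text.toList [] [] (by simp) _ this

-- prefix sums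
def psums (t : Int) : List Int → List Int
  | [] => []
  | x :: xs => (t + x) :: psums (t + x) xs

lemma length_psums (t : Int) (xs : List Int) : (psums t xs).length = xs.length := by
  induction xs generalizing t with
  | nil => rfl
  | cons x xs ih => simp [psums, ih]

lemma psums_shift (t s : Int) (xs : List Int) :
    psums (t + s) xs = (psums s xs).map (fun v => t + v) := by
  induction xs generalizing s with
  | nil => rfl
  | cons x xs ih =>
    simp only [psums, List.map_cons]
    rw [add_assoc]
    exact congrArg (List.cons _) (ih (s + x))

lemma bCumul_loop (ws : List Int) (t : Int) (acc : List Int) :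
    ws.foldl (fun (p : Int × List Int) x => (p.1 + x, p.2 ++ [p.1 + x])) (t, acc)
      = (t + ws.sum, acc ++ psums t ws) := by
  induction ws generalizing t acc with
  | nil => simp [psums]
  | cons x xs ih =>
    simp only [List.foldl_cons, psums, List.sum_cons]
    rw [ih]
    simp [add_assoc]

lemma bCumul_eq (ws : List Int) : bCumul ws = psums 0 ws := by
  unfold bCumul
  rw [bCumul_loop]
  simp

lemma psums_ge (t : Int) (xs : List Int) (hpos : ∀ v ∈ xs, 0 ≤ v) :
    ∀ u ∈ psums t xs, t ≤ u := by
  induction xs generalizing t with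
  | nil => simp [psums]
  | cons x xs ih =>
    intro u hu
    have hx : 0 ≤ x := hpos x (by simp)
    rcases hu with _ | hu
    · omega
    · have := ih (t + x) (fun v hv => hpos v (by simp [hv])) u (by assumption)
      omega

lemma psums_pairwise (t : Int) (xs : List Int) (hpos : ∀ v ∈ xs, 0 ≤ v) :
    (psums t xs).Pairwise (· ≤ ·) := by
  induction xs generalizing t with
  | nil => simp [psums]
  | cons x xs ih =>
    simp only [psums, List.pairwise_cons]
    refine ⟨psums_ge (t + x) xs (fun v hv => hpos v (by simp [hv])), ?_⟩
    exact ih (t + x) (fun v hv => hpos v (by simp [hv]))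

-- the greedy count of A's loop
def gCount : List String → Int → Nat
  | [], _ => 0
  | w :: ws, left =>
    if 0 < left ∧ calculateWidthOfWord w ≤ left then gCount ws (left - calculateWidthOfWord w) + 1
    else 0

lemma makeLineLoop_eq (ws : List String) (left : Int) (acc : List String) :
    makeLineLoop ws left acc = (acc ++ ws.take (gCount ws left), ws.drop (gCount ws left)) := by
  induction ws generalizing left acc with
  | nil =>
    unfold makeLineLoop gCount
    split <;> simp
  | cons w t ih =>
    unfold makeLineLoop gCount
    by_cases hl : left ≤ 0
    · simp only [if_pos hl]
      rw [if_neg (by omega)]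
      simp
    · simp only [if_neg hl]
      by_cases hc : calculateWidthOfWord w ≤ left
      · rw [if_pos hc, if_pos ⟨by omega, hc⟩, ih]
        simp
      · rw [if_neg hc, if_neg (by tauto)]
        simp

lemma gCount_le_length (ws : List String) (left : Int) : gCount ws left ≤ ws.length := by
  induction ws generalizing left with
  | nil => simp [gCount]
  | cons w t ih =>
    unfold gCount
    split
    · have := ih (left - calculateWidthOfWord w); simp; omega
    · simp

lemma gCount_spec (ws : List String) (left : Int)
    (hpos : ∀ w ∈ ws, 1 ≤ calculateWidthOfWord w) :
    (∀ j (hj : j < (psums 0 (ws.map calculateWidthOfWord)).length), j < gCount ws left →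
        (psums 0 (ws.map calculateWidthOfWord))[j] ≤ left) ∧
    (∀ hg : gCount ws left < (psums 0 (ws.map calculateWidthOfWord)).length,
        left < (psums 0 (ws.map calculateWidthOfWord))[gCount ws left]) := by
  induction ws generalizing left with
  | nil => simp [psums, gCount]
  | cons w t ih =>
    have hw : 1 ≤ calculateWidthOfWord w := hpos w (by simp)
    have ht : ∀ x ∈ t, 1 ≤ calculateWidthOfWord x := fun x hx => hpos x (by simp [hx])
    set W := calculateWidthOfWord w with hW
    have hrep : psums 0 ((w :: t).map calculateWidthOfWord)
        = (0 + W) :: (psums 0 (t.map calculateWidthOfWord)).map (fun v => W + v) := by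
      simp only [List.map_cons, psums]
      congr 1
      have := psums_shift W 0 (t.map calculateWidthOfWord)
      simpa using this
    by_cases hc : 0 < left ∧ W ≤ left
    · have hg : gCount (w :: t) left = gCount t (left - W) + 1 := by
        simp only [gCount]
        rw [← hW]
        rw [if_pos hc]
      obtain ⟨ih1, ih2⟩ := ih (left - W) ht
      rw [hrep, hg]
      constructor
      · intro j hj hjg
        cases j with
        | zero => simpa using hc.2
        | succ j =>
          simp only [List.getElem_cons_succ, List.getElem_map]
          have hj' : j < (psums 0 (t.map calculateWidthOfWord)).length := by
            simp at hj ⊢; omega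
          have := ih1 j hj' (by omega)
          omega
      · intro hg'
        simp only [List.getElem_cons_succ, List.getElem_map]
        have hlt : gCount t (left - W) < (psums 0 (t.map calculateWidthOfWord)).length := by
          simp at hg' ⊢; omega
        have := ih2 hlt
        omega
    · have hg : gCount (w :: t) left = 0 := by
        simp only [gCount]
        rw [← hW]
        rw [if_neg hc]
      rw [hrep, hg]
      refine ⟨by omega, ?_⟩
      intro _
      simp only [List.getElem_cons_zero]
      omega

-- binary-search spec
lemma bSearch_spec (cum : List Int) (x : Int)
    (hmono : cum.Pairwise (· ≤ ·)) :
    ∀ n lo hi, hi - lo ≤ n → lo ≤ hi → hi ≤ cum.length →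
      (∀ j (h : j < cum.length), j < lo → cum[j] ≤ x) →
      (∀ j (h : j < cum.length), hi ≤ j → x < cum[j]) →
      lo ≤ bSearch cum x lo hi ∧ bSearch cum x lo hi ≤ hi ∧
      (∀ j (h : j < cum.length), j < bSearch cum x lo hi → cum[j] ≤ x) ∧
      (∀ j (h : j < cum.length), bSearch cum x lo hi ≤ j → x < cum[j]) := by
  have hm : ∀ i j (hi : i ≤ j) (hj : j < cum.length), cum[i]'(by omega) ≤ cum[j] := by
    intro i j hij hj
    rcases Nat.lt_or_ge i j with h | h
    · exact (List.pairwise_iff_getElem.mp hmono) i j (by omega) hj h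
    · have : i = j := by omega
      subst this; exact le_refl _
  intro n
  induction n with
  | zero =>
    intro lo hi hn hlh _ hlow hhigh
    have : lo = hi := by omega
    subst this
    rw [bSearch]
    simp only [lt_irrefl, if_false]
    exact ⟨le_refl _, le_refl _, hlow, fun j h hj => hhigh j h hj⟩
  | succ n ih =>
    intro lo hi hn hlh hhi hlow hhigh
    rw [bSearch]
    by_cases hlt : lo < hi
    · rw [if_pos hlt]
      have hmlen : (lo + hi) / 2 < cum.length := by omega
      have hval : PySem.List.pyGetD cum ((((lo + hi) / 2 : Nat)) : Int) 0
          = cum[(lo + hi) / 2] := by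
        rw [PySem.List.pyGetD_natCast, List.getD_eq_getElem]
      simp only [hval]
      by_cases hcm : cum[(lo + hi) / 2] ≤ x
      · rw [if_pos hcm]
        have h1 : ∀ j (h : j < cum.length), j < (lo + hi) / 2 + 1 → cum[j] ≤ x := by
          intro j h hj
          exact le_trans (hm j ((lo + hi) / 2) (by omega) hmlen) hcm
        have := ih ((lo + hi) / 2 + 1) hi (by omega) (by omega) hhi h1 hhigh
        exact ⟨by omega, this.2.1, this.2.2.1, this.2.2.2⟩
      · rw [if_neg hcm]
        have h2 : ∀ j (h : j < cum.length), (lo + hi) / 2 ≤ j → x < cum[j] := by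
          intro j h hj
          exact lt_of_lt_of_le (by omega) (hm ((lo + hi) / 2) j hj h)
        have := ih lo ((lo + hi) / 2) (by omega) (by omega) (by omega) hlow h2
        exact ⟨this.1, by omega, this.2.2.1, this.2.2.2⟩
    · rw [if_neg hlt]
      have : lo = hi := by omega
      subst this
      exact ⟨le_refl _, le_refl _, hlow, hhigh⟩

lemma cutoff_unique (cum : List Int) (x : Int) (k1 k2 : Nat)
    (h1len : k1 ≤ cum.length) (h2len : k2 ≤ cum.length)
    (h1a : ∀ j (h : j < cum.length), j < k1 → cum[j] ≤ x)
    (h1b : ∀ h : k1 < cum.length, x < cum[k1])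
    (h2a : ∀ j (h : j < cum.length), j < k2 → cum[j] ≤ x)
    (h2b : ∀ h : k2 < cum.length, x < cum[k2]) : k1 = k2 := by
  rcases lt_trichotomy k1 k2 with h | h | h
  · have hk1 : k1 < cum.length := by omega
    have := h2a k1 hk1 h
    have := h1b hk1
    omega
  · exact h
  · have hk2 : k2 < cum.length := by omega
    have := h1a k2 hk2 h
    have := h2b hk2
    omega

-- ===== VERDICT (by name: the statement is the Claim_ definition above) =====
theorem makeLine_spec : Claim_equal_makeLine := by
  intro text width _
  unfold Spec_makeLine
  simp only [makeLine, makeLine_alt]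
  set words := PySem.Str.split₀ text with hwords
  have hne : ∀ w ∈ words, w.toList ≠ [] := split0_ne_nil text
  have hpos : ∀ w ∈ words, 1 ≤ calculateWidthOfWord w := fun w hw => wordWidth_pos w (hne w hw)
  have hmapeq : words.map bWordWidth = words.map calculateWidthOfWord := by
    simp [wordWidth_eq]
  set cum := psums 0 (words.map calculateWidthOfWord) with hcum
  have hcum' : bCumul (words.map bWordWidth) = cum := by
    rw [hmapeq, bCumul_eq]
  have hlen : cum.length = words.length := by
    rw [hcum, length_psums, List.length_map]
  -- B's k
  have hmono : cum.Pairwise (· ≤ ·) := by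
    apply psums_pairwise
    intro v hv
    simp only [List.mem_map] at hv
    obtain ⟨w, hw, rfl⟩ := hv
    have := hpos w hw
    omega
  have hbs := bSearch_spec cum width hmono cum.length 0 cum.length (by omega) (by omega)
    (le_refl _) (by omega) (by omega)
  -- A's g
  have hg := gCount_spec words width hpos
  have hk : gCount words width = bSearch cum width 0 cum.length := by
    apply cutoff_unique cum width _ _ (by rw [hlen]; exact gCount_le_length words width)
      hbs.2.1 (fun j h hj => hg.1 j h hj) (fun h => hg.2 h) hbs.2.2.1
      (fun h => hbs.2.2.2 _ h (le_refl _))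
  rw [makeLineLoop_eq, hcum', ← hk]
  simp only [List.nil_append]
  set line := PySem.Str.join " " (words.take (gCount words width))
  set rest := PySem.Str.join " " (words.drop (gCount words width))
  by_cases h1 : PySem.Chars.isIn ['?'] line.toList = true
  · simp [h1]
  · by_cases h2 : PySem.Chars.isIn ['\''] line.toList = true
    · simp [h1, h2]
    · simp [h1, h2]
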